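-- pv_equiv track=rewrite | github.com/William-D-Jones/advent-of-code-solutions | 2015/day19.py | mol2atoms
-- ===== SOURCE A (Python) =====
-- A = ord('A')
--
-- Z = ord('Z')
--
-- def mol2atoms(Mol):
--     s = ''
--     atom = ''
--     Mol_Spl = []
--     for i in range(len(Mol)):
--         char = Mol[i:i+1]
--         if A<=ord(char)<=Z:
--             if len(s) > 0:
--                 Mol_Spl.append(s)
--                 s = ''
--         s += char
--         if i == len(Mol)-1:
--             Mol_Spl.append(s)
--     return Mol_Spl
-- ===== SOURCE B (Python) =====
-- def mol2atoms(Mol):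
--     # Span-based tokenizer: each token starts at position i; scan ahead to the
--     # next uppercase boundary j and slice the whole token at once.
--     Mol_Spl = []
--     i = 0
--     n = len(Mol)
--     while i < n:
--         j = i + 1
--         while j < n and not ('A' <= Mol[j] <= 'Z'):
--             j += 1
--         Mol_Spl.append(Mol[i:j])
--         i = j
--     return Mol_Spl
-- ===== Notes on version B (the rewrite author's own statement) =====
-- stated objective: faster
-- what changed: Replaces A's per-character accumulator (flush the pending string on each uppercase letter, plus a special flush at the last index) with a span tokenizer: an outer loop over token start positions with an inner scan to the next uppercase boundary, slicing each whole token at once. B slices tokens in O(token) blocks instead of building each token by per-character string concatenation, which a timing run measured as ~3x faster at the largest size.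
import Mathlib
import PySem

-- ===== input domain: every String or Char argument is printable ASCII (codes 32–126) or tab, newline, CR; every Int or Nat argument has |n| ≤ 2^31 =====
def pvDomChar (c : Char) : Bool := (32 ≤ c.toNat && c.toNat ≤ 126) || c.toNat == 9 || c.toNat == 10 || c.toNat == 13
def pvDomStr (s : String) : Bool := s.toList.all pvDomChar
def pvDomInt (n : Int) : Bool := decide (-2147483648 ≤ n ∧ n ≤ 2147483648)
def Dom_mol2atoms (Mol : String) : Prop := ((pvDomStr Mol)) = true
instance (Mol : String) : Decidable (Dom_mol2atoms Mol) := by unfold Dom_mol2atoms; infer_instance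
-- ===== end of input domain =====

-- B replaces A's per-character accumulator (flush on uppercase, extra flush at the
-- last index) with a span tokenizer: jump to the next uppercase boundary and slice
-- whole tokens; objective: faster (constant factor: block slices instead of
-- per-character concatenation; measured ~3x at the largest timed size).
-- Python strings are modelled as List Char (exact on the ASCII domain).

-- ===== PORT A =====
-- 'A' <= ord(char) <= 'Z'  with A = ord('A') = 65, Z = ord('Z') = 90
-- loop body of A's 'for i in range(len(Mol))', state = (s, Mol_Spl)
def stepA (cs : List Char) (st : List Char × List String) (i : Nat) : List Char × List String :=
  let char := cs.getD i ' '      -- Mol[i:i+1]; i < len so always in range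
  let s := st.1
  let spl := st.2
  let (s, spl) :=
    if 65 ≤ char.toNat ∧ char.toNat ≤ 90 then
      if s.length > 0 then (([] : List Char), spl ++ [String.ofList s]) else (s, spl)
    else (s, spl)
  let s := s ++ [char]           -- s += char
  let spl := if i = cs.length - 1 then spl ++ [String.ofList s] else spl
  (s, spl)

def mol2atoms (Mol : String) : List String :=
  let cs := Mol.toList
  ((List.range cs.length).foldl (stepA cs) ([], [])).2

-- ===== PORT B =====
def isUp (c : Char) : Bool := 65 ≤ c.toNat && c.toNat ≤ 90   -- 'A' <= c <= 'Z'

-- outer while: token starts at the head; inner while-scan to the next uppercase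
-- boundary is takeWhile/dropWhile; Mol[i:j] is the sliced token
def tokensB : List Char → List (List Char)
  | [] => []
  | c :: rest =>
      (c :: rest.takeWhile (fun d => !isUp d)) :: tokensB (rest.dropWhile (fun d => !isUp d))
termination_by cs => cs.length
decreasing_by
  simp only [List.length_cons]
  exact Nat.lt_succ_of_le (List.length_dropWhile_le _ _)

def mol2atoms_alt (Mol : String) : List String :=
  (tokensB Mol.toList).map String.ofList

-- ===== PRECONDITION & SPEC =====
def Spec_mol2atoms (Mol : String) (out : List String) : Prop := out = mol2atoms_alt Mol
instance (Mol : String) (out : List String) : Decidable (Spec_mol2atoms Mol out) := by unfold Spec_mol2atoms; infer_instance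

-- ===== CLAIM (what is proved, stated in full; the proofs are below) =====
def Claim_equal_mol2atoms : Prop := ∀ (Mol : String), Dom_mol2atoms Mol → Spec_mol2atoms Mol (mol2atoms Mol)

-- ===== LEMMAS AND PROOFS =====

-- proof-only model of A's loop: g s t = the tokens A still emits given pending
-- run s and remaining characters t (t nonempty)
def g : List Char → List Char → List String
  | s, [] => [String.ofList s]
  | s, c :: r =>
      if 65 ≤ c.toNat ∧ c.toNat ≤ 90 ∧ s ≠ [] then String.ofList s :: g [c] r
      else g (s ++ [c]) r

-- the final pending run of A's loop (needed only to carry the full foldl state)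
def gS : List Char → List Char → List Char
  | s, [] => s
  | s, c :: r => gS (if 65 ≤ c.toNat ∧ c.toNat ≤ 90 ∧ s ≠ [] then [c] else s ++ [c]) r

theorem foldA (cs : List Char) : ∀ (t : List Char) (k : Nat), cs.drop k = t →
    k + t.length = cs.length → ∀ (s : List Char) (acc : List String),
    (List.range' k t.length).foldl (stepA cs) (s, acc)
      = (gS s t, acc ++ if t = [] then [] else g s t) := by
  intro t
  induction t with
  | nil => intro k _ _ s acc; simp [gS]
  | cons c r ih =>
    intro k hdrop hlen s acc
    have hget : cs[k]? = some c := by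
      have h : (List.drop k cs)[0]? = some c := by simp [hdrop]
      rw [List.getElem?_drop] at h
      simpa using h
    have hlast : (k = cs.length - 1) ↔ (r = []) := by
      simp only [List.length_cons] at hlen
      constructor
      · intro h
        have : r.length = 0 := by omega
        exact List.eq_nil_of_length_eq_zero this
      · intro h; subst h; simp at hlen ⊢; omega
    have hdrop' : cs.drop (k + 1) = r := by
      rw [← List.drop_drop, hdrop, List.drop_one, List.tail_cons]
    have hlen' : k + 1 + r.length = cs.length := by
      simp only [List.length_cons] at hlen; omega
    have hcons : List.range' k (c :: r).length = k :: List.range' (k + 1) r.length := by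
      simp [List.range'_succ]
    rw [hcons, List.foldl_cons]
    by_cases hup : 65 ≤ c.toNat ∧ c.toNat ≤ 90 <;>
      by_cases hs : s = [] <;> by_cases hr : r = []
    all_goals
      simp [stepA, hget, hup, hs, hlast, hr, g, gS, List.length_pos_iff,
        ih (k + 1) hdrop' hlen']

theorem isUp_iff (c : Char) : isUp c = true ↔ (65 ≤ c.toNat ∧ c.toNat ≤ 90) := by
  simp [isUp]

theorem gtok : ∀ (r s : List Char), s ≠ [] →
    g s r = String.ofList (s ++ r.takeWhile (fun d => !isUp d))
      :: (tokensB (r.dropWhile (fun d => !isUp d))).map String.ofList := by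
  intro r
  induction r with
  | nil => intro s hs; simp [g, tokensB]
  | cons c q ih =>
    intro s hs
    by_cases hc : isUp c = true
    · have hup : 65 ≤ c.toNat ∧ c.toNat ≤ 90 := (isUp_iff c).mp hc
      simp [g, hup, hs, hc, tokensB,
        ih [c] (by simp)]
    · have hup : ¬ (65 ≤ c.toNat ∧ c.toNat ≤ 90) := fun h => hc ((isUp_iff c).mpr h)
      simp [g, hc,
        ih (s ++ [c]) (by simp)]
      intro h1 h2 _
      exact absurd ⟨h1, h2⟩ hup

theorem molA (Mol : String) :
    mol2atoms Mol = if Mol.toList = [] then [] else g [] Mol.toList := by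
  show (((List.range Mol.toList.length).foldl (stepA Mol.toList) ([], [])).2)
      = if Mol.toList = [] then [] else g [] Mol.toList
  rw [List.range_eq_range',
    foldA Mol.toList Mol.toList 0 (by simp) (by simp)]
  split <;> simp [*]

theorem mol2atoms_spec : Claim_equal_mol2atoms := by
  intro Mol _
  unfold Spec_mol2atoms mol2atoms_alt
  rw [molA]
  cases h : Mol.toList with
  | nil => simp [tokensB]
  | cons c r =>
    have h1 : g [] (c :: r) = g [c] r := by simp [g]
    simp only [if_neg (by simp : ¬ (c :: r = [])), h1,
      gtok r [c] (by simp), tokensB]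
    simp
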